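-- pv_equiv track=rewrite | github.com/lunixbochs/patchkit | patches/harden/05_io_filter.py | _c_pre
-- ===== SOURCE A (Python) =====
-- def _c_pre(code, syms):
--     out = []
--     if syms == ['transmit']:
--         # TODO: this is really gross text parsing
--         for line in code.split('\n'):
--             out.append(line)
--             if line.startswith('int transmit(') and line.endswith('{'):
--                 out.append(r'''
--                 if (((uint32_t)buf < 0x4347c000 && (uint32_t)buf + size > 0x4347c000) ||
--                     ((uint32_t)buf >= 0x4347c000 && (uint32_t)buf < 0x4347c000 + 0x1000)) {
--                     transmit(1, "Try a type 3.\n", 14, 0);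
--                     _terminate(0);
--                 }
--                 ''')
--         return '\n'.join(out)
--     elif syms == ['receive']:
--         return
-- ===== SOURCE B (Python) =====
-- GUARD = r'''
--                 if (((uint32_t)buf < 0x4347c000 && (uint32_t)buf + size > 0x4347c000) ||
--                     ((uint32_t)buf >= 0x4347c000 && (uint32_t)buf < 0x4347c000 + 0x1000)) {
--                     transmit(1, "Try a type 3.\n", 14, 0);
--                     _terminate(0);
--                 }
--                 '''
--
--
-- def _c_pre(code, syms):
--     if syms != ['transmit']:
--         return None
--     # pass 1: character offsets in `code` of the end of each matching declaration line
--     cuts = []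
--     pos = 0
--     for line in code.split('\n'):
--         pos += len(line)
--         if line.startswith('int transmit(') and line.endswith('{'):
--             cuts.append(pos)
--         pos += 1
--     # pass 2: splice the guard block into slices of the original string at those offsets
--     out = []
--     prev = 0
--     for cut in cuts:
--         out.append(code[prev:cut])
--         out.append('\n' + GUARD)
--         prev = cut
--     out.append(code[prev:])
--     return ''.join(out)
-- ===== Notes on version B (the rewrite author's own statement) =====
-- stated objective: alternative
-- what changed: Instead of A's single pass that accumulates a list of output lines (line, then conditionally the guard) and joins them, B first computes the character offsets of the ends of matching declaration lines and then splices the guard block into slices of the original string at those offsets.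
import Mathlib
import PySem

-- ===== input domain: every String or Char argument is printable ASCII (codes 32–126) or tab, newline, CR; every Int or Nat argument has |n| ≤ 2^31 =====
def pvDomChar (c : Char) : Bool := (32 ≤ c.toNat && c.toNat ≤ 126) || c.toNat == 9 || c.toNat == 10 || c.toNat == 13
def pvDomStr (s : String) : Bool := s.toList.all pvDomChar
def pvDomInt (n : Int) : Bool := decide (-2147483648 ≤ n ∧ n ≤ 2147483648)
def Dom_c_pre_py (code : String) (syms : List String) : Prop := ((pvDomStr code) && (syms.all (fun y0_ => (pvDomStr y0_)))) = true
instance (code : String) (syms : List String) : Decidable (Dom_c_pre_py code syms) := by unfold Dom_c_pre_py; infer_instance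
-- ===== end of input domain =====

-- B replaces A's single pass that accumulates the list of output lines by two staged passes:
-- first the character offsets of the ends of matching declaration lines, then a splice of the
-- guard block into slices of the original string at those offsets; objective: alternative, same cost.

-- the raw guard string inserted after each matching declaration line (shared constant of both Pythons)
def pvGuard : String := "\n                if (((uint32_t)buf < 0x4347c000 && (uint32_t)buf + size > 0x4347c000) ||\n                    ((uint32_t)buf >= 0x4347c000 && (uint32_t)buf < 0x4347c000 + 0x1000)) {\n                    transmit(1, \"Try a type 3.\\n\", 14, 0);\n                    _terminate(0);\n                }\n                "

-- ===== PORT A =====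
def c_pre_py (code : String) (syms : List String) : Option String :=
  if syms == ["transmit"] then
    let out : List String :=
      ((PySem.Str.split? code "\n").getD []).foldl
        (fun out line =>
          let out := out ++ [line]
          if PySem.Str.startswith line "int transmit(" && PySem.Str.endswith line "{" then
            out ++ [pvGuard]
          else out) []
    some (PySem.Str.join "\n" out)
  else if syms == ["receive"] then
    none
  else
    none

-- ===== PORT B =====
def c_pre_py_alt (code : String) (syms : List String) : Option String :=
  if syms != ["transmit"] then
    none
  else
    -- pass 1: offsets in code of the end of each matching declaration line
    let st := ((PySem.Str.split? code "\n").getD []).foldl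
      (fun (st : Int × List Int) line =>
        let pos := st.1 + PySem.Str.len line
        let cuts := if PySem.Str.startswith line "int transmit(" && PySem.Str.endswith line "{" then
            st.2 ++ [pos]
          else st.2
        (pos + 1, cuts)) (0, [])
    -- pass 2: splice '\n' + guard into slices of the original string at those offsets
    let fin := st.2.foldl
      (fun (st : Int × List String) cut =>
        (cut, st.2 ++ [PySem.Str.slice code (some st.1) (some cut), "\n" ++ pvGuard]))
      (0, [])
    some (PySem.Str.join "" (fin.2 ++ [PySem.Str.slice code (some fin.1) none]))

-- ===== PRECONDITION & SPEC =====
def Spec_c_pre_py (code : String) (syms : List String) (out : Option String) : Prop := out = c_pre_py_alt code syms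
instance (code : String) (syms : List String) (out : Option String) : Decidable (Spec_c_pre_py code syms out) := by unfold Spec_c_pre_py; infer_instance

-- ===== CLAIM (what is proved, stated in full; the proofs are below) =====
def Claim_equal_c_pre_py : Prop := ∀ (code : String) (syms : List String), Dom_c_pre_py code syms → Spec_c_pre_py code syms (c_pre_py code syms)

-- ===== LEMMAS AND PROOFS =====
theorem pv_go_acc (sep : List Char) (fuel : Nat) (l cur : List Char) (acc : List (List Char)) :
    PySem.Chars.splitOn.go sep fuel l cur acc = acc.reverse ++ PySem.Chars.splitOn.go sep fuel l cur [] := by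
  induction fuel generalizing l cur acc with
  | zero => simp [PySem.Chars.splitOn.go]
  | succ fuel ih =>
    cases l with
    | nil => simp [PySem.Chars.splitOn.go]
    | cons c rest =>
      rw [PySem.Chars.splitOn.go, PySem.Chars.splitOn.go]
      split_ifs with hp
      · rw [ih _ _ (cur.reverse :: acc), ih _ _ ([cur.reverse])]
        simp
      · exact ih _ _ _

theorem pv_consume (line : List Char) (fuel : Nat) (l cur : List Char) (acc : List (List Char))
    (h : '\n' ∉ line) :
    PySem.Chars.splitOn.go ['\n'] (line.length + fuel) (line ++ l) cur acc =
    PySem.Chars.splitOn.go ['\n'] fuel l (line.reverse ++ cur) acc := by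
  induction line generalizing cur with
  | nil => simp
  | cons c line' ih =>
    have hc : c ≠ '\n' := by rintro rfl; exact h (List.mem_cons_self)
    have h' : '\n' ∉ line' := fun hm => h (List.mem_cons_of_mem _ hm)
    have : line'.length + fuel + 1 = (c :: line').length + fuel := by simp; omega
    rw [show (c :: line').length + fuel = (line'.length + fuel) + 1 by simp; omega]
    have hpre : List.isPrefixOf ['\n'] (c :: (line' ++ l)) = false := by
      simp [List.isPrefixOf]; exact fun hh => absurd hh.symm hc
    simp only [List.cons_append]
    rw [PySem.Chars.splitOn.go, if_neg (by simp [hpre])]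
    rw [ih _ h']
    simp

theorem pv_split_no_nl (l : List Char) (h : '\n' ∉ l) :
    PySem.Chars.splitOn l ['\n'] = [l] := by
  unfold PySem.Chars.splitOn
  rw [show l.length + 1 = l.length + 1 by rfl]
  have := pv_consume l 1 [] [] [] h
  simp only [List.append_nil] at this
  rw [this]
  simp [PySem.Chars.splitOn.go]

theorem pv_split_cons (line rest : List Char) (h : '\n' ∉ line) :
    PySem.Chars.splitOn (line ++ '\n' :: rest) ['\n'] = line :: PySem.Chars.splitOn rest ['\n'] := by
  unfold PySem.Chars.splitOn
  rw [show (line ++ '\n' :: rest).length + 1 = line.length + (rest.length + 2) by simp; omega]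
  rw [pv_consume line (rest.length + 2) ('\n' :: rest) [] [] h]
  rw [show rest.length + 2 = (rest.length + 1) + 1 by omega]
  rw [PySem.Chars.splitOn.go, if_pos (by simp [List.isPrefixOf])]
  simp only [List.length_cons, List.length_nil, List.drop_succ_cons, List.drop_zero,
    List.append_nil, List.reverse_reverse]
  rw [pv_go_acc]
  simp

theorem pv_decomp (cs : List Char) (h : '\n' ∈ cs) :
    ∃ line rest, cs = line ++ '\n' :: rest ∧ '\n' ∉ line := by
  induction cs with
  | nil => cases h
  | cons c t ih =>
    by_cases hc : c = '\n'
    · exact ⟨[], t, by simp [hc], by simp⟩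
    · have ht : '\n' ∈ t := (List.mem_cons.mp h).resolve_left (fun he => hc he.symm)
      obtain ⟨line, rest, heq, hnl⟩ := ih ht
      exact ⟨c :: line, rest, by simp [heq], by simp [hnl]; exact fun hh => hc hh.symm⟩

theorem pv_split_ne_nil (cs : List Char) : PySem.Chars.splitOn cs ['\n'] ≠ [] := by
  by_cases h : '\n' ∈ cs
  · obtain ⟨line, rest, heq, hnl⟩ := pv_decomp cs h
    rw [heq, pv_split_cons _ _ hnl]; simp
  · rw [pv_split_no_nl _ h]; simp

theorem pv_join_split (cs : List Char) :
    PySem.Chars.join ['\n'] (PySem.Chars.splitOn cs ['\n']) = cs := by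
  induction hn : cs.length using Nat.strong_induction_on generalizing cs with
  | _ n ih =>
    by_cases h : '\n' ∈ cs
    · obtain ⟨line, rest, heq, hnl⟩ := pv_decomp cs h
      subst heq
      rw [pv_split_cons _ _ hnl]
      rcases hr : PySem.Chars.splitOn rest ['\n'] with _ | ⟨r0, rt⟩
      · exact absurd hr (pv_split_ne_nil rest)
      · rw [PySem.Chars.join_cons_cons]
        rw [← hr]
        have : PySem.Chars.join ['\n'] (PySem.Chars.splitOn rest ['\n']) = rest := by
          subst hn
          exact ih rest.length (by simp; omega) rest rfl
        rw [this]
        simp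
    · rw [pv_split_no_nl _ h, PySem.Chars.join_singleton]


def pvMatchC (l : List Char) : Bool :=
  PySem.Chars.startswith l ("int transmit(".toList) && PySem.Chars.endswith l ("{".toList)

def pvF (g : List Char) (l : List Char) : List Char := if pvMatchC l then l ++ '\n' :: g else l

def pvCutsAux : List (List Char) → Nat → List Nat
  | [], _ => []
  | l :: ls, s => (if pvMatchC l then [s + l.length] else []) ++ pvCutsAux ls (s + l.length + 1)

def pvSpliceFrom (g cs : List Char) : Nat → List Nat → List Char
  | s, [] => cs.drop s
  | s, c :: cuts => (cs.drop s).take (c - s) ++ '\n' :: g ++ pvSpliceFrom g cs c cuts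

theorem pv_a_join (lines : List String) :
    (PySem.Str.join "\n" (lines.flatMap
        (fun line => if PySem.Str.startswith line "int transmit(" && PySem.Str.endswith line "{" then [line, pvGuard] else [line]))).toList =
    PySem.Chars.join ['\n'] ((lines.map String.toList).map (pvF pvGuard.toList)) := by
  rw [PySem.Str.toList_join]
  have hsep : ("\n" : String).toList = ['\n'] := by decide
  rw [hsep]
  induction lines with
  | nil => rfl
  | cons a t ih =>
    have hm : (PySem.Str.startswith a "int transmit(" && PySem.Str.endswith a "{") = pvMatchC a.toList := by
      simp [pvMatchC]
    cases t with
    | nil =>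
      simp only [List.flatMap_cons, List.flatMap_nil, List.append_nil, List.map_cons, List.map_nil, hm, pvF]
      by_cases hp : pvMatchC a.toList
      · simp [hp, PySem.Chars.join_cons_cons, PySem.Chars.join_singleton]
      · simp [hp, PySem.Chars.join_singleton]
    | cons b t' =>
      have hmb : (PySem.Str.startswith b "int transmit(" && PySem.Str.endswith b "{") = pvMatchC b.toList := by
        simp [pvMatchC]
      simp only [List.flatMap_cons, List.map_cons, List.map_append, hm, hmb] at *
      by_cases hp : pvMatchC a.toList <;> by_cases hq : pvMatchC b.toList <;>
        simp_all [pvF, PySem.Chars.join_cons_cons, List.append_assoc]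

theorem pv_join_nil_flatten (ps : List (List Char)) :
    PySem.Chars.join [] ps = ps.flatten := by
  induction ps with
  | nil => rfl
  | cons a t ih =>
    cases t with
    | nil => simp [PySem.Chars.join_singleton]
    | cons b t' => rw [PySem.Chars.join_cons_cons, ih]; simp

theorem pv_cuts_foldl (lines : List String) (s : Nat) (acc : List Int) :
    (lines.foldl (fun (st : Int × List Int) line =>
        let pos := st.1 + PySem.Str.len line
        let cuts := if PySem.Str.startswith line "int transmit(" && PySem.Str.endswith line "{" then
            st.2 ++ [pos]
          else st.2
        (pos + 1, cuts)) ((s : Int), acc)).2 =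
      acc ++ (pvCutsAux (lines.map String.toList) s).map (fun n : Nat => (n : Int)) := by
  induction lines generalizing s acc with
  | nil => simp [pvCutsAux]
  | cons a t ih =>
    have hm : (PySem.Str.startswith a "int transmit(" && PySem.Str.endswith a "{") = pvMatchC a.toList := by
      simp [pvMatchC]
    have hlen : PySem.Str.len a = ((a.toList.length : Nat) : Int) := by
      simp [PySem.Str.len]
    simp only [List.foldl_cons, List.map_cons, pvCutsAux, hm, hlen]
    have hcast : ((s : Int) + (a.toList.length : Int)) + 1 = ((s + a.toList.length + 1 : Nat) : Int) := by
      push_cast; ring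
    by_cases hp : pvMatchC a.toList
    · simp only [hp, if_pos]
      rw [hcast, ih]
      simp
    · have hp' : pvMatchC a.toList = false := by simpa using hp
      simp only [hp', Bool.false_eq_true, if_false]
      rw [hcast, ih]
      simp

theorem pv_cuts_le (ls : List (List Char)) (s : Nat) : ∀ c ∈ pvCutsAux ls s, s ≤ c := by
  induction ls generalizing s with
  | nil => simp [pvCutsAux]
  | cons l t ih =>
    intro c hc
    simp only [pvCutsAux, List.mem_append] at hc
    rcases hc with hc | hc
    · by_cases hp : pvMatchC l
      · simp [hp] at hc; omega
      · simp [hp] at hc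
    · have := ih (s + l.length + 1) c hc; omega

theorem pv_splice_shift (g cs : List Char) (s s' : Nat) (cuts : List Nat)
    (h1 : s ≤ s') (h2 : ∀ c ∈ cuts, s' ≤ c) :
    pvSpliceFrom g cs s cuts = (cs.drop s).take (s' - s) ++ pvSpliceFrom g cs s' cuts := by
  cases cuts with
  | nil =>
    simp only [pvSpliceFrom]
    conv_lhs => rw [← List.take_append_drop (s' - s) (cs.drop s)]
    rw [List.drop_drop, show s + (s' - s) = s' by omega]
  | cons c cuts' =>
    have hc : s' ≤ c := h2 c (List.mem_cons_self)
    simp only [pvSpliceFrom]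
    rw [show c - s = (s' - s) + (c - s') by omega, List.take_add, List.drop_drop,
      show s + (s' - s) = s' by omega]
    simp [List.append_assoc]

theorem pv_splice_main (g : List Char) (lines : List (List Char)) (s : Nat) (cs : List Char)
    (h : cs.drop s = PySem.Chars.join ['\n'] lines) :
    pvSpliceFrom g cs s (pvCutsAux lines s) = PySem.Chars.join ['\n'] (lines.map (pvF g)) := by
  induction lines generalizing s with
  | nil =>
    simp only [pvCutsAux, pvSpliceFrom, List.map_nil, PySem.Chars.join_nil] at *
    exact h
  | cons l ls ih =>
    have hcuts : pvCutsAux (l :: ls) s =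
        (if pvMatchC l then [s + l.length] else []) ++ pvCutsAux ls (s + l.length + 1) := rfl
    rw [hcuts]
    cases ls with
    | nil =>
      simp only [PySem.Chars.join_singleton] at h
      have hdropL : List.drop (s + l.length) cs = [] := by
        rw [show s + l.length = s + l.length by rfl, ← List.drop_drop, h]
        simp
      by_cases hp : pvMatchC l
      · rw [if_pos hp]
        simp only [pvCutsAux, List.append_nil, pvSpliceFrom]
        rw [h, hdropL]
        simp [pvF, hp, PySem.Chars.join_singleton]
      · rw [if_neg (by simp [hp])]
        simp only [pvCutsAux, List.nil_append, pvSpliceFrom]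
        rw [h]
        simp [pvF, hp, PySem.Chars.join_singleton]
    | cons l2 ls' =>
      rw [PySem.Chars.join_cons_cons] at h
      have hdrop2 : cs.drop (s + l.length + 1) = PySem.Chars.join ['\n'] (l2 :: ls') := by
        rw [show s + l.length + 1 = s + (l.length + 1) by omega, ← List.drop_drop, h]
        simp [List.drop_append]
      have hdrop1 : cs.drop (s + l.length) = '\n' :: PySem.Chars.join ['\n'] (l2 :: ls') := by
        rw [show s + l.length = s + l.length by rfl, ← List.drop_drop, h]
        simp
      have hIH := ih (s + l.length + 1) hdrop2
      have hbound := pv_cuts_le (l2 :: ls') (s + l.length + 1)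
      rw [show PySem.Chars.join ['\n'] ((l :: l2 :: ls').map (pvF g)) =
          pvF g l ++ ['\n'] ++ PySem.Chars.join ['\n'] ((l2 :: ls').map (pvF g)) from
        PySem.Chars.join_cons_cons _ _ _ _]
      by_cases hp : pvMatchC l
      · rw [if_pos hp, List.singleton_append]
        simp only [pvSpliceFrom]
        rw [pv_splice_shift g cs (s + l.length) (s + l.length + 1) _ (by omega) hbound]
        rw [hIH, hdrop1]
        have htake : (cs.drop s).take (s + l.length - s) = l := by
          rw [h, show s + l.length - s = l.length by omega]
          simp
        rw [htake]
        simp [pvF, hp, List.append_assoc]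
      · rw [if_neg (by simp [hp]), List.nil_append]
        rw [pv_splice_shift g cs s (s + l.length + 1) _ (by omega) hbound]
        rw [hIH]
        have htake : (cs.drop s).take (s + l.length + 1 - s) = l ++ ['\n'] := by
          rw [h, show s + l.length + 1 - s = l.length + 1 by omega, List.take_add]
          simp
        rw [htake]
        simp [pvF, hp, List.append_assoc]

theorem pv_join_empty_toList (parts : List String) :
    (PySem.Str.join "" parts).toList = (parts.map String.toList).flatten := by
  rw [PySem.Str.toList_join]
  rw [show ("" : String).toList = [] from rfl]
  exact pv_join_nil_flatten _

theorem pv_splice_foldl (code : String) (cuts : List Nat) (prev : Nat) (out : List String) :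
    (PySem.Str.join "" (((cuts.map (fun n : Nat => (n : Int))).foldl (fun (st : Int × List String) cut =>
        (cut, st.2 ++ [PySem.Str.slice code (some st.1) (some cut), "\n" ++ pvGuard]))
        ((prev : Int), out)).2 ++
      [PySem.Str.slice code
        (some (((cuts.map (fun n : Nat => (n : Int))).foldl (fun (st : Int × List String) cut =>
        (cut, st.2 ++ [PySem.Str.slice code (some st.1) (some cut), "\n" ++ pvGuard]))
        ((prev : Int), out)).1)) none])).toList =
    (PySem.Str.join "" out).toList ++ pvSpliceFrom pvGuard.toList code.toList prev cuts := by
  induction cuts generalizing prev out with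
  | nil =>
    simp only [List.map_nil, List.foldl_nil, pvSpliceFrom]
    rw [pv_join_empty_toList, pv_join_empty_toList]
    simp only [List.map_append, List.flatten_append, List.map_cons, List.map_nil,
      List.flatten_cons, List.flatten_nil, List.append_nil]
    rw [PySem.Str.toList_slice, PySem.Chars.slice_eq_listSlice,
      PySem.List.slice_from _ (by positivity)]
    simp
  | cons c cs ih =>
    simp only [List.map_cons, List.foldl_cons]
    rw [ih c (out ++ [PySem.Str.slice code (some (prev : Int)) (some (c : Int)), "\n" ++ pvGuard])]
    rw [pv_join_empty_toList, pv_join_empty_toList]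
    simp only [List.map_append, List.flatten_append, List.map_cons, List.map_nil,
      List.flatten_cons, List.flatten_nil, List.append_nil]
    rw [PySem.Str.toList_slice, PySem.Chars.slice_eq_listSlice, PySem.List.slice_natCast]
    rw [String.toList_append]
    simp only [pvSpliceFrom]
    simp [List.append_assoc, show ("\n" : String).toList = ['\n'] from rfl]

theorem pv_lines_toList (code : String) :
    ((PySem.Str.split? code "\n").getD []).map String.toList =
      PySem.Chars.splitOn code.toList ['\n'] := by
  simp [PySem.Str.split?, PySem.Chars.split?, show ("\n" : String).toList = ['\n'] from rfl,
    List.map_map, Function.comp_def]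

theorem pv_foldl_eq_flatMap (lines : List String) (p : String → Bool) (g : String) :
    lines.foldl (fun out line =>
      let out := out ++ [line]
      if p line then out ++ [g] else out) [] =
    lines.flatMap (fun line => if p line then [line, g] else [line]) := by
  have h := PySem.List.foldl_append_eq_flatMap
    (fun line => if p line then [line, g] else [line]) lines ([] : List String)
  rw [List.nil_append] at h
  rw [← h]
  have hf : (fun (out : List String) line =>
      let out := out ++ [line]
      if p line = true then out ++ [g] else out) =
      (fun (acc : List String) x => acc ++ if p x = true then [x, g] else [x]) := by
    funext acc x
    by_cases hp : p x = true <;> simp [hp]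
  rw [hf]

theorem pv_transmit_eq (code : String) (st : Int × List Int) (fin : Int × List String)
    (hst : st = ((PySem.Str.split? code "\n").getD []).foldl
      (fun (st : Int × List Int) line =>
        let pos := st.1 + PySem.Str.len line
        let cuts := if PySem.Str.startswith line "int transmit(" && PySem.Str.endswith line "{" then
            st.2 ++ [pos]
          else st.2
        (pos + 1, cuts)) (0, []))
    (hfin : fin = st.2.foldl
      (fun (st : Int × List String) cut =>
        (cut, st.2 ++ [PySem.Str.slice code (some st.1) (some cut), "\n" ++ pvGuard]))
      (0, [])) :
    PySem.Str.join "\n"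
      (((PySem.Str.split? code "\n").getD []).foldl
        (fun (out : List String) line =>
          let out := out ++ [line]
          if PySem.Str.startswith line "int transmit(" && PySem.Str.endswith line "{" then
            out ++ [pvGuard]
          else out) []) =
    PySem.Str.join "" (fin.2 ++ [PySem.Str.slice code (some fin.1) none]) := by
  have hst2 : st.2 = (pvCutsAux (((PySem.Str.split? code "\n").getD []).map String.toList) 0).map
      (fun n : Nat => (n : Int)) := by
    rw [hst, show (0 : Int) = ((0 : Nat) : Int) by simp, pv_cuts_foldl _ 0 []]
    simp
  apply String.toList_inj.mp
  rw [pv_foldl_eq_flatMap, pv_a_join]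
  rw [hfin, hst2, show (0 : Int) = ((0 : Nat) : Int) by simp, pv_splice_foldl code _ 0 []]
  rw [pv_lines_toList]
  rw [pv_splice_main _ _ _ _ (by rw [List.drop_zero, pv_join_split])]
  rfl

theorem pv_final (code : String) (syms : List String) :
    c_pre_py code syms = c_pre_py_alt code syms := by
  unfold c_pre_py c_pre_py_alt
  by_cases h : syms = ["transmit"]
  · rw [if_pos (by simp [h]), if_neg (by simp [h])]
    exact congrArg some (pv_transmit_eq code _ _ rfl rfl)
  · have hb : (syms == ["transmit"]) = false := by simp [h]
    have hb' : (syms != ["transmit"]) = true := by simp [h]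
    simp only [hb, hb', Bool.false_eq_true, if_false, if_true]
    by_cases h2 : syms = ["receive"] <;> simp [h2]

-- ===== VERDICT (by name: the statement is the Claim_ definition above) =====
theorem c_pre_py_spec : Claim_equal_c_pre_py := by
  intro code syms _
  unfold Spec_c_pre_py
  exact pv_final code syms
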